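-- pv_equiv track=rewrite | github.com/dioff/Niubility_xunfei | send_goals/scripts/plant2.py | list_rename
-- ===== SOURCE A (Python) =====
-- def replace_by_dict(input_list, replacement_dict):
--     return list(map(replacement_dict.get, input_list))
--
-- def list_rename(lst):
--     replacement_dict = {
--         'plant_corn': '玉米',
--         'plant_cucumber': '黄瓜',
--         'plant_rice': '水稻',
--         'plant_wheat': '小麦'
--     }
--     lst = replace_by_dict(lst, replacement_dict)
--
--     # 重点！！！！！！！！！！！！！！！！！！！！！！！！！！
--     # 重点！！！！！！！！！！！！！！！！！！！！！！！！！！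
--     # 重点！！！！！！！！！！！！！！！！！！！！！！！！！！
--     # 重点！！！！！！！！！！！！！！！！！！！！！！！！！！
--     # 重点！！！！！！！！！！！！！！！！！！！！！！！！！！
--     # 重点！！！！！！！！！！！！！！！！！！！！！！！！！！
--     # 重点！！！！！！！！！！！！！！！！！！！！！！！！！！
--     # 重点！！！！！！！！！！！！！！！！！！！！！！！！！！
--     # name_areas 是区域的顺序，会按顺序播报，要修改就改这个，其他一点不要动
--     name_areas = ['E_', 'D_', 'B_']
--     lst = [str(a) + str(b) for a, b in zip(name_areas, lst)]
--
--     return lst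
-- ===== SOURCE B (Python) =====
-- def list_rename(lst):
--     replacement_dict = {
--         'plant_corn': '玉米',
--         'plant_cucumber': '黄瓜',
--         'plant_rice': '水稻',
--         'plant_wheat': '小麦'
--     }
--
--     def go(areas, items):
--         # recursion on both lists at once; stops when either runs out (zip truncation)
--         if not areas or not items:
--             return []
--         return [areas[0] + str(replacement_dict.get(items[0]))] + go(areas[1:], items[1:])
--
--     return go(['E_', 'D_', 'B_'], lst)
-- ===== Notes on version B (the rewrite author's own statement) =====
-- stated objective: alternative
-- what changed: Replaces A's two staged list passes (a full-list dict.get map, then a zip-with-labels comprehension) with a single structural recursion over both lists at once that conses each labelled lookup, so the lookup is inline and only the first min(3, len(lst)) elements are ever visited.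
import Mathlib
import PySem

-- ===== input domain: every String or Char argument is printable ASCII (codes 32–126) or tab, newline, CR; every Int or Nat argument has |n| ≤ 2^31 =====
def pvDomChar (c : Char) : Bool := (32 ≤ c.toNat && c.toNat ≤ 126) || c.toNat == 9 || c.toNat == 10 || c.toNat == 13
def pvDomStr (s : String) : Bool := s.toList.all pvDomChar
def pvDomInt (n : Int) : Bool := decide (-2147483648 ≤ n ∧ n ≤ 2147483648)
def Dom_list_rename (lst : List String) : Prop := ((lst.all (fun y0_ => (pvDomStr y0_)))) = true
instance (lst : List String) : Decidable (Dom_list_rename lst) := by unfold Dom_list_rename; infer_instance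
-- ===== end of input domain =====

-- B replaces A's two staged passes (map dict.get over the whole list, then a
-- zip-with-labels comprehension) by one structural recursion over both lists at
-- once with the lookup inline; objective: alternative decomposition.

-- the replacement dict both Pythons build
def pvRenameDict : PySem.Dict String String :=
  PySem.Dict.ofList [("plant_corn", "玉米"), ("plant_cucumber", "黄瓜"),
                     ("plant_rice", "水稻"), ("plant_wheat", "小麦")]

-- str(x) where x = dict.get(...): str(None) = "None", str of a str is itself
def pvOptStr (o : Option String) : String :=
  match o with
  | none => "None"
  | some s => s

-- ===== PORT A =====
-- replace_by_dict(input_list, replacement_dict) = list(map(replacement_dict.get, input_list))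
def replace_by_dict (input_list : List String) (replacement_dict : PySem.Dict String String) :
    List (Option String) :=
  input_list.map (fun x => replacement_dict.get? x)

def list_rename (lst : List String) : List String :=
  let replacement_dict := pvRenameDict
  let lst1 := replace_by_dict lst replacement_dict
  let name_areas : List String := ["E_", "D_", "B_"]
  (name_areas.zip lst1).map (fun ab => ab.1 ++ pvOptStr ab.2)

-- ===== PORT B =====
-- go(areas, items): recursion on both lists, consing the labelled lookup
def list_rename_go (areas : List String) (items : List String) : List String :=
  match areas, items with
  | [], _ => []
  | _, [] => []
  | a :: as_, x :: xs => (a ++ pvOptStr (pvRenameDict.get? x)) :: list_rename_go as_ xs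

def list_rename_alt (lst : List String) : List String :=
  list_rename_go ["E_", "D_", "B_"] lst

-- ===== PRECONDITION & SPEC =====
def Spec_list_rename (lst : List String) (out : List String) : Prop := out = list_rename_alt lst
instance (lst : List String) (out : List String) : Decidable (Spec_list_rename lst out) := by unfold Spec_list_rename; infer_instance

-- ===== CLAIM =====
def Claim_equal_list_rename : Prop := ∀ (lst : List String), Dom_list_rename lst → Spec_list_rename lst (list_rename lst)

-- ===== LEMMAS AND PROOFS =====
theorem list_rename_go_eq (areas lst : List String) :
    list_rename_go areas lst
      = (areas.zip (lst.map (fun x => pvRenameDict.get? x))).map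
          (fun ab => ab.1 ++ pvOptStr ab.2) := by
  induction areas generalizing lst with
  | nil => simp [list_rename_go]
  | cons a as_ ih =>
    cases lst with
    | nil => simp [list_rename_go]
    | cons x xs => simp [list_rename_go, ih]

-- ===== VERDICT =====
theorem list_rename_spec : Claim_equal_list_rename := by
  intro lst _
  unfold Spec_list_rename list_rename list_rename_alt replace_by_dict
  rw [list_rename_go_eq]
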